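-- pv_equiv track=rewrite | github.com/kristopher-miles/threadspeak-audiobook | app/script_repair.py | _find_clean_end
-- ===== SOURCE A (Python) =====
-- def _find_clean_end(text, earliest_end, end_limit):
--     window = text[earliest_end:min(len(text), end_limit + 240)]
--     candidates = [pos for pos in (window.find("\n\n"), window.find(". "), window.find("! "), window.find("? ")) if pos != -1]
--     if candidates:
--         return earliest_end + min(candidates) + 1
--     space = window.find(" ")
--     if space != -1:
--         return earliest_end + space
--     return min(len(text), end_limit)
-- ===== SOURCE B (Python) =====
-- def _find_clean_end(text, earliest_end, end_limit):
--     window = text[earliest_end:min(len(text), end_limit + 240)]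
--     first_space = -1
--     for i, ch in enumerate(window):
--         nxt = window[i + 1] if i + 1 < len(window) else ""
--         if (ch == "\n" and nxt == "\n") or (ch in ".!?" and nxt == " "):
--             return earliest_end + i + 1
--         if first_space < 0 and ch == " ":
--             first_space = i
--     if first_space >= 0:
--         return earliest_end + first_space
--     return min(len(text), end_limit)
-- ===== Notes on version B (the rewrite author's own statement) =====
-- stated objective: simpler
-- what changed: Replaces the four separate substring find() scans plus min() (and a fifth scan for the space fallback) by a single left-to-right pass over the window that returns at the first break pair and records the first space on the way.
import Mathlib
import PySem

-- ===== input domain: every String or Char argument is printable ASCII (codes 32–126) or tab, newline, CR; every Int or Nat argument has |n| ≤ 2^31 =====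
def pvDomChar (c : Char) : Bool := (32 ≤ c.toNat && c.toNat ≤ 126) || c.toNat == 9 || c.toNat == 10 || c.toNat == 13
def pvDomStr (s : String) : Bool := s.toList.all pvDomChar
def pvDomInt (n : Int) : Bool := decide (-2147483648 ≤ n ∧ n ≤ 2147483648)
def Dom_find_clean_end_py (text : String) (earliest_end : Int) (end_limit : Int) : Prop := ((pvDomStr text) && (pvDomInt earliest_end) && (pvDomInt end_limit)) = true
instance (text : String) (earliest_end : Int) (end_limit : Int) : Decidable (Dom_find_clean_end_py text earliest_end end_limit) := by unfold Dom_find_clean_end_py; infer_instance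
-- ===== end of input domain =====

-- B replaces A's four separate substring find() scans + min() (and the extra space scan) by a single left-to-right pass over the window; objective: simpler.

-- ===== PORT A =====
def find_clean_end_py (text : String) (earliest_end : Int) (end_limit : Int) : Int :=
  let s := text.toList
  let window := PySem.List.slice s (some earliest_end) (some (min (s.length : Int) (end_limit + 240)))
  let candidates := ([PySem.Chars.find window ['\n', '\n'], PySem.Chars.find window ['.', ' '],
                      PySem.Chars.find window ['!', ' '], PySem.Chars.find window ['?', ' ']]).filter
                      (fun pos => pos ≠ -1)
  match PySem.List.min? candidates (fun x => x) with
  | some m => earliest_end + m + 1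
  | none =>
    let space := PySem.Chars.find window [' ']
    if space ≠ -1 then earliest_end + space
    else min (s.length : Int) end_limit

-- ===== PORT B =====
-- B's single pass: index i, first_space accumulator (-1 = not yet seen); early return (some r) on a break pair.
def bLoop (earliest_end : Int) : List Char → Nat → Int → Option Int × Int
  | [], _, fs => (none, fs)
  | c :: rest, i, fs =>
    if (c == '\n' && rest.head? == some '\n')
        || ((c == '.' || c == '!' || c == '?') && rest.head? == some ' ') then
      (some (earliest_end + (i : Int) + 1), fs)
    else
      bLoop earliest_end rest (i + 1) (if fs < 0 && c == ' ' then (i : Int) else fs)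

def find_clean_end_py_alt (text : String) (earliest_end : Int) (end_limit : Int) : Int :=
  let s := text.toList
  let window := PySem.List.slice s (some earliest_end) (some (min (s.length : Int) (end_limit + 240)))
  match bLoop earliest_end window 0 (-1) with
  | (some r, _) => r
  | (none, fs) => if 0 ≤ fs then earliest_end + fs else min (s.length : Int) end_limit

-- ===== PRECONDITION & SPEC =====
def Spec_find_clean_end_py (text : String) (earliest_end : Int) (end_limit : Int) (out : Int) : Prop := out = find_clean_end_py_alt text earliest_end end_limit
instance (text : String) (earliest_end : Int) (end_limit : Int) (out : Int) : Decidable (Spec_find_clean_end_py text earliest_end end_limit out) := by unfold Spec_find_clean_end_py; infer_instance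

-- ===== CLAIM (what is proved, stated in full; the proofs are below) =====
def Claim_equal_find_clean_end_py : Prop := ∀ (text : String) (earliest_end : Int) (end_limit : Int), Dom_find_clean_end_py text earliest_end end_limit → Spec_find_clean_end_py text earliest_end end_limit (find_clean_end_py text earliest_end end_limit)

-- ===== LEMMAS AND PROOFS =====

-- the suffix predicate B's loop tests: the suffix starts with one of the four break pairs
def brkP (sfx : List Char) : Bool :=
  match sfx with
  | c :: d :: _ => (c == '\n' && d == '\n') || ((c == '.' || c == '!' || c == '?') && d == ' ')
  | _ => false

-- index of the first suffix satisfying P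
def firstIdx (P : List Char → Bool) : List Char → Option Nat
  | [] => none
  | c :: rest => if P (c :: rest) then some 0 else (firstIdx P rest).map (· + 1)

theorem firstIdx_some {P : List Char → Bool} {w : List Char} {j : Nat}
    (h : firstIdx P w = some j) : P (w.drop j) = true ∧ ∀ i < j, P (w.drop i) = false := by
  induction w generalizing j with
  | nil => simp [firstIdx] at h
  | cons c rest ih =>
    by_cases hp : P (c :: rest) = true
    · simp [firstIdx, hp] at h
      subst h; simpa using hp
    · simp [firstIdx, hp] at h
      obtain ⟨j', hj', rfl⟩ := h
      obtain ⟨h1, h2⟩ := ih hj'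
      refine ⟨by simpa using h1, ?_⟩
      intro i hi
      cases i with
      | zero => simpa using (Bool.eq_false_iff.2 hp)
      | succ i' => simpa using h2 i' (by omega)

theorem firstIdx_none {P : List Char → Bool} {w : List Char}
    (h : firstIdx P w = none) (h0 : P [] = false) : ∀ i, P (w.drop i) = false := by
  induction w with
  | nil => intro i; simpa using h0
  | cons c rest ih =>
    by_cases hp : P (c :: rest) = true
    · simp [firstIdx, hp] at h
    · simp [firstIdx, hp] at h
      intro i
      cases i with
      | zero => simpa using (Bool.eq_false_iff.2 hp)
      | succ i' => simpa using ih h i'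

theorem brkP_cons (c : Char) (rest : List Char) :
    brkP (c :: rest) = ((c == '\n' && rest.head? == some '\n')
        || ((c == '.' || c == '!' || c == '?') && rest.head? == some ' ')) := by
  cases rest <;> simp [brkP]

theorem bLoop_fst (e : Int) (w : List Char) (i : Nat) (fs : Int) :
    (bLoop e w i fs).1 = (firstIdx brkP w).map (fun j => e + ((i + j : Nat) : Int) + 1) := by
  induction w generalizing i fs with
  | nil => simp [bLoop, firstIdx]
  | cons c rest ih =>
    rw [bLoop, firstIdx, ← brkP_cons c rest]
    by_cases hp : brkP (c :: rest) = true
    · simp [hp]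
    · simp only [hp, if_neg, Bool.false_eq_true, not_false_eq_true, ih]
      cases hfi : firstIdx brkP rest <;> simp <;> push_cast <;> ring_nf

theorem bLoop_snd (e : Int) (w : List Char) (i : Nat) (fs : Int)
    (h : firstIdx brkP w = none) :
    (bLoop e w i fs).2 = if fs < 0 then
        (match firstIdx (fun sfx => sfx.head? == some ' ') w with
         | some j => ((i + j : Nat) : Int)
         | none => fs)
      else fs := by
  induction w generalizing i fs with
  | nil => simp [bLoop, firstIdx]
  | cons c rest ih =>
    rw [firstIdx] at h
    by_cases hp : brkP (c :: rest) = true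
    · simp [hp] at h
    · rw [bLoop, ← brkP_cons c rest, if_neg hp]
      simp only [hp, if_neg, Bool.false_eq_true, not_false_eq_true, Option.map_eq_none_iff] at h
      rw [ih _ _ h, firstIdx]
      by_cases hc : c = ' '
      · subst hc
        by_cases hfs : fs < 0
        · simp [hfs]
        · simp [hfs]
      · by_cases hfs : fs < 0
        · simp only [hc, hfs]
          simp [hc, hfs]
          cases hfi : firstIdx (fun sfx => sfx.head? == some ' ') rest <;> simp <;> push_cast <;> ring_nf
        · simp [hc, hfs]

theorem single_prefix_iff (a : Char) (l : List Char) : [a] <+: l ↔ l.head? = some a := by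
  cases l with
  | nil => simp
  | cons x t => simp [List.cons_prefix_cons, eq_comm]

theorem brkP_true_iff (s : List Char) : brkP s = true ↔
    (['\n','\n'] <+: s) ∨ (['.',' '] <+: s) ∨ (['!',' '] <+: s) ∨ (['?',' '] <+: s) := by
  match s with
  | [] => simp [brkP]
  | [c] => simp [brkP, List.cons_prefix_cons]
  | c :: d :: t =>
    simp [brkP, List.cons_prefix_cons, beq_iff_eq]
    tauto

-- find w p points at j when p first occurs at j among brkP-positions

theorem find_le_of_prefix_drop {w p : List Char} {j : Nat} (h : p <+: w.drop j) :
    0 ≤ PySem.Chars.find w p ∧ PySem.Chars.find w p ≤ (j : Int) := by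
  have hinf : p <:+: w := h.isInfix.trans (List.drop_suffix j w).isInfix
  have h0 : 0 ≤ PySem.Chars.find w p := (PySem.Chars.find_nonneg_iff _ _).2 hinf
  obtain ⟨_, hmin⟩ := PySem.Chars.find_spec h0
  refine ⟨h0, ?_⟩
  by_contra hlt
  push_neg at hlt
  have : j < (PySem.Chars.find w p).toNat := by omega
  exact hmin j this h

theorem find_ge_of_min {w p : List Char} {j : Nat}
    (hP : ∀ s, p <+: s → brkP s = true)
    (hj : ∀ i < j, brkP (w.drop i) = false)
    (hne : PySem.Chars.find w p ≠ -1) : (j : Int) ≤ PySem.Chars.find w p := by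
  have hinf : p <:+: w := (PySem.Chars.find_ne_neg_one_iff _ _).1 hne
  have h0 : 0 ≤ PySem.Chars.find w p := (PySem.Chars.find_nonneg_iff _ _).2 hinf
  obtain ⟨hpre, _⟩ := PySem.Chars.find_spec h0
  have hb : brkP (w.drop (PySem.Chars.find w p).toNat) = true := hP _ hpre
  by_contra hlt
  push_neg at hlt
  have : (PySem.Chars.find w p).toNat < j := by omega
  rw [hj _ this] at hb; exact absurd hb (by simp)

theorem min?_eq_of {cands : List Int} {j : Nat}
    (hmem : ∃ x ∈ cands, x ≤ (j : Int)) (hall : ∀ x ∈ cands, (j : Int) ≤ x) :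
    PySem.List.min? cands (fun x => x) = some (j : Int) := by
  cases hm : PySem.List.min? cands (fun x => x) with
  | none =>
    rw [PySem.List.min?_eq_none_iff] at hm
    obtain ⟨x, hx, _⟩ := hmem
    simp [hm] at hx
  | some m =>
    have hmmem := PySem.List.min?_mem hm
    obtain ⟨x, hx, hxle⟩ := hmem
    have h1 : m ≤ x := PySem.List.min?_isMin hm x hx
    have h2 : (j : Int) ≤ m := hall m hmmem
    have : m = (j : Int) := le_antisymm (h1.trans hxle) h2
    rw [this]

theorem find_space_eq (w : List Char) :
    PySem.Chars.find w [' '] =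
      (match firstIdx (fun sfx => sfx.head? == some ' ') w with
       | some j => (j : Int) | none => -1) := by
  cases hfi : firstIdx (fun sfx => sfx.head? == some ' ') w with
  | none =>
    have hall := firstIdx_none hfi (by simp)
    rw [PySem.Chars.find_eq_neg_one_iff _ _]
    intro hinf
    obtain ⟨jj, hj⟩ := (PySem.Chars.exists_prefix_drop_iff_isIn [' '] w).2
      ((PySem.Chars.isIn_iff_infix [' '] w).2 hinf)
    have := hall jj
    rw [(single_prefix_iff ' ' _).1 hj] at this
    simp at this
  | some j =>
    obtain ⟨h1, h2⟩ := firstIdx_some hfi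
    have hpre : [' '] <+: w.drop j := (single_prefix_iff ' ' _).2 (by simpa using h1)
    obtain ⟨h0, hle⟩ := find_le_of_prefix_drop hpre
    obtain ⟨hp, hmin⟩ := PySem.Chars.find_spec h0
    have hge : (j:Int) ≤ PySem.Chars.find w [' '] := by
      by_contra hlt
      push_neg at hlt
      have hlt' : (PySem.Chars.find w [' ']).toNat < j := by omega
      have := h2 _ hlt'
      rw [(single_prefix_iff ' ' _).1 hp] at this
      simp at this
    show PySem.Chars.find w [' '] = ((j : Nat) : Int)
    omega

theorem min_cands_eq (w : List Char) :
    PySem.List.min? (([PySem.Chars.find w ['\n', '\n'], PySem.Chars.find w ['.', ' '],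
        PySem.Chars.find w ['!', ' '], PySem.Chars.find w ['?', ' ']]).filter (fun pos => pos ≠ -1))
        (fun x => x)
      = (firstIdx brkP w).map (fun j => (j : Int)) := by
  cases hfi : firstIdx brkP w with
  | none =>
    have hall := firstIdx_none hfi (by simp [brkP])
    have hnone : ∀ p ∈ [['\n','\n'], ['.',' '], ['!',' '], ['?',' ']], PySem.Chars.find w p = -1 := by
      intro p hp
      rw [PySem.Chars.find_eq_neg_one_iff _ _]
      intro hinf
      obtain ⟨jj, hj⟩ := (PySem.Chars.exists_prefix_drop_iff_isIn p w).2
        ((PySem.Chars.isIn_iff_infix p w).2 hinf)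
      have hb : brkP (w.drop jj) = true := by
        rw [brkP_true_iff]
        fin_cases hp <;> tauto
      rw [hall jj] at hb; exact absurd hb (by simp)
    have e1 := hnone ['\n','\n'] (by simp)
    have e2 := hnone ['.',' '] (by simp)
    have e3 := hnone ['!',' '] (by simp)
    have e4 := hnone ['?',' '] (by simp)
    simp [e1, e2, e3, e4, PySem.List.min?]
  | some j =>
    obtain ⟨h1, h2⟩ := firstIdx_some hfi
    show _ = some ((j : Nat) : Int)
    apply min?_eq_of
    · -- some candidate is ≤ j
      rcases (brkP_true_iff _).1 h1 with hpre | hpre | hpre | hpre <;>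
        [ (obtain ⟨h0, hle⟩ := find_le_of_prefix_drop hpre;
           exact ⟨_, by simp [List.mem_filter]; omega, hle⟩);
          (obtain ⟨h0, hle⟩ := find_le_of_prefix_drop hpre;
           exact ⟨_, by simp [List.mem_filter]; omega, hle⟩);
          (obtain ⟨h0, hle⟩ := find_le_of_prefix_drop hpre;
           exact ⟨_, by simp [List.mem_filter]; omega, hle⟩);
          (obtain ⟨h0, hle⟩ := find_le_of_prefix_drop hpre;
           exact ⟨_, by simp [List.mem_filter]; omega, hle⟩)]
    · intro x hx
      simp [List.mem_filter] at hx
      obtain ⟨hx4, hxne⟩ := hx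
      rcases hx4 with rfl | rfl | rfl | rfl <;>
        exact find_ge_of_min (fun s hs => (brkP_true_iff s).2 (by tauto)) h2 hxne

-- the two ports agree on any window and offset
theorem core_eq (e : Int) (w : List Char) (dflt : Int) :
    (match PySem.List.min? (([PySem.Chars.find w ['\n', '\n'], PySem.Chars.find w ['.', ' '],
        PySem.Chars.find w ['!', ' '], PySem.Chars.find w ['?', ' ']]).filter (fun pos => pos ≠ -1))
        (fun x => x) with
     | some m => e + m + 1
     | none => if PySem.Chars.find w [' '] ≠ -1 then e + PySem.Chars.find w [' '] else dflt)
    = (match bLoop e w 0 (-1) with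
       | (some r, _) => r
       | (none, fs) => if 0 ≤ fs then e + fs else dflt) := by
  rcases hbl : bLoop e w 0 (-1) with ⟨b1, b2⟩
  have hb1 := bLoop_fst e w 0 (-1)
  rw [hbl] at hb1
  rw [min_cands_eq w]
  cases hfi : firstIdx brkP w with
  | some j =>
    rw [hfi] at hb1
    simp only [Option.map_some] at hb1
    simp [hb1]
  | none =>
    rw [hfi] at hb1
    simp only [Option.map_none] at hb1
    have hb2 := bLoop_snd e w 0 (-1) hfi
    rw [hbl] at hb2
    simp only [Option.map_none, hb1]
    rw [find_space_eq w]
    cases hsp : firstIdx (fun sfx => sfx.head? == some ' ') w with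
    | some k =>
      rw [hsp] at hb2
      norm_num at hb2
      simp [hb2]
    | none =>
      rw [hsp] at hb2
      norm_num at hb2
      simp [hb2]

-- ===== VERDICT (by name: the statement is the Claim_ definition above) =====
theorem find_clean_end_py_spec : Claim_equal_find_clean_end_py := by
  intro text e l _
  unfold Spec_find_clean_end_py find_clean_end_py find_clean_end_py_alt
  exact core_eq e _ _
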